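-- pv_equiv track=rewrite | github.com/Mkjones10/Layered-Honeypot-IDS-SOC-Project | pull_tpot_logs.py | extract_honeypot_name
-- ===== SOURCE A (Python) =====
-- HONEYPOT_NAMES = [
--     "adbhoney", "conpot", "cowrie", "dicompot", "dionaea", "elasticpot",
--     "fatt", "h0neytr4p", "heralding", "honeyaml", "honeytrap", "ipphoney",
--     "mailoney", "miniprint", "p0f", "redishoneypot", "sentrypeer",
--     "suricata", "tanner", "wordpot"
-- ]
--
-- def extract_honeypot_name(path):
--     p = path.lower()
--     for hp in HONEYPOT_NAMES:
--         if f"/{hp}/" in p: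
--             return hp
--     for piece in p.split("/"):
--         if piece in HONEYPOT_NAMES:
--             return piece
--     return None
-- ===== SOURCE B (Python) =====
-- HONEYPOT_NAMES = [
--     "adbhoney", "conpot", "cowrie", "dicompot", "dionaea", "elasticpot",
--     "fatt", "h0neytr4p", "heralding", "honeyaml", "honeytrap", "ipphoney",
--     "mailoney", "miniprint", "p0f", "redishoneypot", "sentrypeer",
--     "suricata", "tanner", "wordpot"
-- ]
--
-- _RANK = {name: i for i, name in enumerate(HONEYPOT_NAMES)}
--
--
-- def extract_honeypot_name(path):
--     # Rank-based selection instead of one substring scan per name: a name is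
--     # slash-delimited in the path iff it is an interior segment of the split,
--     # and scanning names in list order is the same as taking the minimal rank.
--     segments = path.lower().split("/")
--     best = None
--     for seg in segments[1:-1]:
--         r = _RANK.get(seg)
--         if r is not None and (best is None or r < best):
--             best = r
--     if best is not None:
--         return HONEYPOT_NAMES[best]
--     for seg in segments:
--         if seg in _RANK:
--             return seg
--     return None
-- ===== Notes on version B (the rewrite author's own statement) =====
-- stated objective: alternative
-- what changed: A scans the whole path once per name with a substring search; B inverts the index: it precomputes each name's rank, makes a single pass over the split path's interior segments keeping the minimal rank seen (which is provably the name A's first loop returns), and only falls back to a first-match scan of the segments.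
import Mathlib
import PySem

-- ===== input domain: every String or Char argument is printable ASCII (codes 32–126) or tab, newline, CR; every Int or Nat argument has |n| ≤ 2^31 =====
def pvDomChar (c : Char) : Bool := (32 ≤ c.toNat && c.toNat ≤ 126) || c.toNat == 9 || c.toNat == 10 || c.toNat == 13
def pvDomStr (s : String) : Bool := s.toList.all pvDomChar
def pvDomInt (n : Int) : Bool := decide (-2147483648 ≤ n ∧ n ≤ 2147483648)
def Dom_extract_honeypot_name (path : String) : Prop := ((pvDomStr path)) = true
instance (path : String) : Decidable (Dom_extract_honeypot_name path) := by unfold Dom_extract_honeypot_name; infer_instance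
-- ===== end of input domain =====

-- B replaces A's per-name substring scans by a precomputed name→rank index and one
-- min-rank pass over the split path's interior segments; return value proved equal everywhere.

def HONEYPOT_NAMES : List String := [
  "adbhoney", "conpot", "cowrie", "dicompot", "dionaea", "elasticpot",
  "fatt", "h0neytr4p", "heralding", "honeyaml", "honeytrap", "ipphoney",
  "mailoney", "miniprint", "p0f", "redishoneypot", "sentrypeer",
  "suricata", "tanner", "wordpot"]

-- ===== PORT A =====
def extract_honeypot_name (path : String) : Option String :=
  let p := PySem.Str.lower path
  match HONEYPOT_NAMES.find? (fun hp => PySem.Str.isIn ("/" ++ hp ++ "/") p) with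
  | some hp => some hp
  | none =>
    match ((PySem.Str.split? p "/").getD []).find?
        (fun piece => HONEYPOT_NAMES.contains piece) with
    | some piece => some piece
    | none => none

-- ===== PORT B =====
-- _RANK = {name: i for i, name in enumerate(HONEYPOT_NAMES)}
def RANK : PySem.Dict String Int :=
  (PySem.List.enumerate HONEYPOT_NAMES 0).foldl (fun d p => d.insert p.2 p.1) PySem.Dict.empty

def extract_honeypot_name_alt (path : String) : Option String :=
  let segments := (PySem.Str.split? (PySem.Str.lower path) "/").getD []
  let best := (PySem.List.slice segments (some 1) (some (-1))).foldl
      (fun best seg =>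
        match RANK.get? seg with
        | some r => if best.all (fun b => r < b) then some r else best
        | none => best) none
  match best with
  | some b => PySem.List.pyGet? HONEYPOT_NAMES b
  | none => segments.find? (fun seg => RANK.contains seg)

-- ===== PRECONDITION & SPEC =====
def Spec_extract_honeypot_name (path : String) (out : Option String) : Prop := out = extract_honeypot_name_alt path
instance (path : String) (out : Option String) : Decidable (Spec_extract_honeypot_name path out) := by unfold Spec_extract_honeypot_name; infer_instance

-- ===== CLAIM (what is proved, stated in full; the proofs are below) =====
def Claim_equal_extract_honeypot_name : Prop := ∀ (path : String), Dom_extract_honeypot_name path → Spec_extract_honeypot_name path (extract_honeypot_name path)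

-- ===== LEMMAS AND PROOFS =====

-- Reference one-pass splitter on '/', used to characterise PySem.Chars.splitOn.
def pySplitSlash (pre : List Char) : List Char → List (List Char)
  | [] => [pre]
  | c :: rest => if c = '/' then pre :: pySplitSlash [] rest else pySplitSlash (pre ++ [c]) rest

-- Reference join with '/'.
def joinSlash : List (List Char) → List Char
  | [] => []
  | [s] => s
  | s :: r :: rest => s ++ '/' :: joinSlash (r :: rest)

theorem pySplitSlash_nil (pre : List Char) : pySplitSlash pre [] = [pre] := rfl

theorem pySplitSlash_cons_slash (pre rest : List Char) :
    pySplitSlash pre ('/' :: rest) = pre :: pySplitSlash [] rest := by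
  simp [pySplitSlash]

theorem pySplitSlash_cons_ne (pre : List Char) {c : Char} (rest : List Char) (hc : c ≠ '/') :
    pySplitSlash pre (c :: rest) = pySplitSlash (pre ++ [c]) rest := by
  simp [pySplitSlash, hc]

theorem go_spec (l : List Char) : ∀ (fuel : Nat) (cur : List Char) (acc : List (List Char)),
    l.length < fuel →
    PySem.Chars.splitOn.go ['/'] fuel l cur acc = acc.reverse ++ pySplitSlash cur.reverse l := by
  induction l with
  | nil =>
    intro fuel cur acc h
    match fuel, h with
    | fuel + 1, _ => simp [PySem.Chars.splitOn.go, pySplitSlash]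
  | cons c rest ih =>
    intro fuel cur acc h
    match fuel, h with
    | fuel + 1, h =>
      by_cases hc : c = '/'
      · subst hc
        have hpre : List.isPrefixOf ['/'] ('/' :: rest) = true := by
          simp [List.isPrefixOf]
        simp only [PySem.Chars.splitOn.go, hpre, if_pos, List.length_cons, List.length_nil,
          Nat.zero_add, List.drop_succ_cons, List.drop_zero]
        rw [ih fuel [] (cur.reverse :: acc) (by simpa using Nat.lt_of_succ_lt_succ h)]
        simp [pySplitSlash_cons_slash]
      · have hpre : List.isPrefixOf ['/'] (c :: rest) = false := by
          simp only [List.isPrefixOf, Bool.and_eq_false_iff, beq_eq_false_iff_ne, ne_eq]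
          exact Or.inl (fun h' => hc h'.symm)
        simp only [PySem.Chars.splitOn.go, hpre, Bool.false_eq_true, if_false]
        rw [ih fuel (c :: cur) acc (by simpa using Nat.lt_of_succ_lt_succ h)]
        rw [pySplitSlash_cons_ne cur.reverse rest hc]
        simp

theorem splitOn_slash_eq (cs : List Char) :
    PySem.Chars.splitOn cs ['/'] = pySplitSlash [] cs := by
  unfold PySem.Chars.splitOn
  rw [go_spec cs (cs.length + 1) [] [] (by omega)]
  simp

theorem pySplitSlash_ne_nil (l : List Char) : ∀ pre, pySplitSlash pre l ≠ [] := by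
  induction l with
  | nil => intro pre; simp [pySplitSlash_nil]
  | cons c rest ih =>
    intro pre
    by_cases hc : c = '/'
    · subst hc; rw [pySplitSlash_cons_slash]; simp
    · rw [pySplitSlash_cons_ne pre rest hc]; exact ih _

theorem joinSlash_cons (s : List Char) (segs : List (List Char)) (h : segs ≠ []) :
    joinSlash (s :: segs) = s ++ '/' :: joinSlash segs := by
  cases segs with
  | nil => exact absurd rfl h
  | cons r rest => simp [joinSlash]

theorem joinSlash_pySplitSlash (l : List Char) : ∀ pre, joinSlash (pySplitSlash pre l) = pre ++ l := by
  induction l with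
  | nil => intro pre; simp [pySplitSlash_nil, joinSlash]
  | cons c rest ih =>
    intro pre
    by_cases hc : c = '/'
    · subst hc
      rw [pySplitSlash_cons_slash]
      rw [joinSlash_cons _ _ (pySplitSlash_ne_nil rest []), ih []]
      simp
    · rw [pySplitSlash_cons_ne pre rest hc, ih (pre ++ [c])]
      simp

theorem noSlash_pySplitSlash (l : List Char) : ∀ pre, ('/' : Char) ∉ pre →
    ∀ s ∈ pySplitSlash pre l, ('/' : Char) ∉ s := by
  induction l with
  | nil =>
    intro pre hpre s hs
    rw [pySplitSlash_nil] at hs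
    simp at hs; subst hs; exact hpre
  | cons c rest ih =>
    intro pre hpre s hs
    by_cases hc : c = '/'
    · subst hc
      rw [pySplitSlash_cons_slash] at hs
      rcases List.mem_cons.1 hs with rfl | hs'
      · exact hpre
      · exact ih [] (by simp) s hs'
    · rw [pySplitSlash_cons_ne pre rest hc] at hs
      refine ih (pre ++ [c]) ?_ s hs
      intro hm
      rcases List.mem_append.1 hm with hm | hm
      · exact hpre hm
      · simp at hm; exact hc hm.symm

theorem infix_iff_drop (sub s : List Char) : sub <:+: s ↔ ∃ j, sub <+: s.drop j := by
  rw [← PySem.Chars.isIn_iff_infix, ← PySem.Chars.exists_prefix_drop_iff_isIn]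

theorem not_infix_of_noSlash (q s : List Char) (hs : ('/' : Char) ∉ s) :
    ¬ ('/' :: q <:+: s) := by
  intro h
  exact hs (h.sublist.subset (by simp))

theorem decomp (q a t : List Char) (ha : ('/' : Char) ∉ a) :
    ('/' :: q <:+: (a ++ '/' :: t)) ↔ (q <+: t ∨ '/' :: q <:+: t) := by
  constructor
  · intro h
    obtain ⟨j, hj⟩ := (infix_iff_drop _ _).1 h
    rcases lt_trichotomy j a.length with hlt | heq | hgt
    · exfalso
      rw [List.drop_append_of_le_length (le_of_lt hlt)] at hj
      have hne : a.drop j ≠ [] := by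
        intro hnil
        have hlen := congrArg List.length hnil
        simp at hlen; omega
      obtain ⟨c, cs, hcons⟩ := List.exists_cons_of_ne_nil hne
      rw [hcons] at hj
      have hcq : c = '/' := by
        have h2 : ('/' : Char) :: q <+: c :: (cs ++ '/' :: t) := by simpa using hj
        exact (List.cons_prefix_cons.1 h2).1.symm
      have hmem : c ∈ a := List.mem_of_mem_drop (hcons ▸ List.mem_cons_self)
      rw [hcq] at hmem; exact ha hmem
    · subst heq
      rw [List.drop_left] at hj
      exact Or.inl (List.cons_prefix_cons.1 hj).2
    · right
      rw [List.drop_append] at hj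
      rw [List.drop_eq_nil_of_le (le_of_lt hgt)] at hj
      simp only [List.nil_append] at hj
      have hk : j - a.length = (j - a.length - 1) + 1 := by omega
      rw [hk, List.drop_succ_cons] at hj
      exact (infix_iff_drop _ _).2 ⟨j - a.length - 1, hj⟩
  · rintro (h | h)
    · rw [infix_iff_drop]
      exact ⟨a.length, by rw [List.drop_left]; exact List.cons_prefix_cons.2 ⟨rfl, h⟩⟩
    · have hsuf : t <:+ (a ++ '/' :: t) := ⟨a ++ ['/'], by simp⟩
      exact h.trans hsuf.isInfix

theorem prefix_eq (t : List Char) : ∀ (x r1 : List Char), ('/' : Char) ∉ x → ('/' : Char) ∉ r1 →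
    ((x ++ ['/']) <+: (r1 ++ '/' :: t) ↔ x = r1) := by
  intro x
  induction x with
  | nil =>
    intro r1 hx hr1
    cases r1 with
    | nil => simp
    | cons d r1' =>
      constructor
      · intro h
        have h2 : ('/' : Char) :: [] <+: d :: (r1' ++ '/' :: t) := by simpa using h
        have := (List.cons_prefix_cons.1 h2).1
        exact absurd (this ▸ List.mem_cons_self) hr1
      · intro h; exact absurd h (by simp)
  | cons c x' ih =>
    intro r1 hx hr1
    cases r1 with
    | nil =>
      constructor
      · intro h
        have h2 : c :: (x' ++ ['/']) <+: '/' :: t := by simpa using h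
        have := (List.cons_prefix_cons.1 h2).1
        exact absurd (this ▸ List.mem_cons_self) hx
      · intro h; exact absurd h (by simp)
    | cons d r1' =>
      have hx' : ('/' : Char) ∉ x' := fun hm => hx (List.mem_cons_of_mem _ hm)
      have hr1' : ('/' : Char) ∉ r1' := fun hm => hr1 (List.mem_cons_of_mem _ hm)
      constructor
      · intro h
        have h2 : c :: (x' ++ ['/']) <+: d :: (r1' ++ '/' :: t) := by simpa using h
        obtain ⟨h3, h4⟩ := List.cons_prefix_cons.1 h2
        rw [h3, (ih r1' hx' hr1').1 h4]
      · intro h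
        rw [← h]
        simpa using List.cons_prefix_cons.2 ⟨rfl, (ih x' hx' hx').2 rfl⟩

theorem main_segs (x : List Char) (hx : ('/' : Char) ∉ x) :
    ∀ segs : List (List Char), (∀ s ∈ segs, ('/' : Char) ∉ s) →
    (('/' :: (x ++ ['/'])) <:+: joinSlash segs ↔ x ∈ (segs.drop 1).dropLast) := by
  intro segs
  induction segs with
  | nil =>
    intro _
    simp only [joinSlash, List.drop_nil, List.dropLast_nil, List.not_mem_nil, iff_false]
    exact not_infix_of_noSlash _ _ (by simp)
  | cons s0 rest ih =>
    intro hfree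
    cases rest with
    | nil =>
      simp only [joinSlash, List.drop_succ_cons, List.drop_nil, List.dropLast_nil,
        List.not_mem_nil, iff_false]
      exact not_infix_of_noSlash _ _ (hfree s0 (by simp))
    | cons r1 rest' =>
      rw [joinSlash_cons s0 (r1 :: rest') (by simp)]
      rw [decomp _ _ _ (hfree s0 (by simp))]
      have hr1 : ('/' : Char) ∉ r1 := hfree r1 (by simp)
      have hfree' : ∀ s ∈ (r1 :: rest'), ('/' : Char) ∉ s :=
        fun s hs => hfree s (List.mem_cons_of_mem _ hs)
      rw [ih hfree']
      cases rest' with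
      | nil =>
        simp only [joinSlash, List.drop_succ_cons, List.drop_nil, List.dropLast_nil,
          List.not_mem_nil, or_false]
        constructor
        · intro h
          exact absurd (h.sublist.subset (by simp)) hr1
        · intro h; simp at h
      | cons r2 rest2 =>
        rw [joinSlash_cons r1 (r2 :: rest2) (by simp)]
        rw [prefix_eq _ x r1 hx hr1]
        simp only [List.drop_succ_cons, List.drop_zero]
        rw [List.dropLast_cons_of_ne_nil (l := r2 :: rest2) (by simp)]
        constructor
        · rintro (rfl | h)
          · exact List.mem_cons_self
          · exact List.mem_cons_of_mem _ h
        · intro h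
          rcases List.mem_cons.1 h with rfl | h
          · exact Or.inl rfl
          · exact Or.inr h

theorem master (cs x : List Char) (hx : ('/' : Char) ∉ x) :
    PySem.Chars.isIn ('/' :: (x ++ ['/'])) cs
      = ((pySplitSlash [] cs).drop 1).dropLast.contains x := by
  have h1 := PySem.Chars.isIn_iff_infix ('/' :: (x ++ ['/'])) cs
  have h2 := main_segs x hx (pySplitSlash [] cs) (noSlash_pySplitSlash cs [] (by simp))
  rw [joinSlash_pySplitSlash cs []] at h2
  simp only [List.nil_append] at h2
  rw [Bool.eq_iff_iff, h1, h2, List.contains_iff_mem]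

theorem slice_one_neg_one {α : Type} (xs : List α) :
    PySem.List.slice xs (some 1) (some (-1)) = (xs.drop 1).dropLast := by
  cases xs with
  | nil => rfl
  | cons a l =>
    have ha : PySem.List.clampIdx (a :: l).length 1 = 1 := by
      simp [PySem.List.clampIdx]
    have hb : PySem.List.clampIdx (a :: l).length (-1) = l.length := by
      simp [PySem.List.clampIdx]
    rw [show PySem.List.slice (a :: l) (some 1) (some (-1))
        = List.take (PySem.List.clampIdx (a :: l).length (-1) - PySem.List.clampIdx (a :: l).length 1)
            (List.drop (PySem.List.clampIdx (a :: l).length 1) (a :: l)) from rfl]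
    rw [ha, hb]
    simp only [List.drop_succ_cons, List.drop_zero]
    rw [List.dropLast_eq_take]

theorem find?_congr_mem {α : Type} (l : List α) (p q : α → Bool)
    (h : ∀ a ∈ l, p a = q a) : l.find? p = l.find? q := by
  induction l with
  | nil => rfl
  | cons a l ih =>
    simp only [List.find?_cons, h a (by simp)]
    cases q a with
    | true => rfl
    | false => exact ih (fun b hb => h b (List.mem_cons_of_mem _ hb))

theorem names_noSlash : ∀ hp ∈ HONEYPOT_NAMES, ('/' : Char) ∉ hp.toList := by decide

theorem mem_map_ofList (hp : String) (css : List (List Char)) :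
    (hp ∈ css.map String.ofList) ↔ hp.toList ∈ css := by
  constructor
  · intro hm
    obtain ⟨cs, hcs, rfl⟩ := List.mem_map.1 hm
    simpa [String.toList_ofList] using hcs
  · intro hm
    exact List.mem_map.2 ⟨hp.toList, hm, String.ofList_toList⟩

theorem segs_eq (p : String) :
    (PySem.Str.split? p "/").getD [] = (pySplitSlash [] p.toList).map String.ofList := by
  have hsep : ("/" : String).toList = ['/'] := rfl
  simp [PySem.Str.split?, PySem.Chars.split?, hsep, splitOn_slash_eq, List.isEmpty]

-- ===== B-side machinery: rank dictionary and min-rank fold =====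

-- entries of a dict {name_i : k+i} built over names from offset k
def pairsFrom : Int → List String → List (String × Int)
  | _, [] => []
  | k, n :: ns => (n, k) :: pairsFrom (k + 1) ns

theorem RANK_eq : RANK = PySem.Dict.mk (pairsFrom 0 HONEYPOT_NAMES) := by decide

theorem get?_pairsFrom (names : List String) : ∀ (k : Int) (s : String),
    (PySem.Dict.mk (pairsFrom k names)).get? s
      = (List.idxOf? s names).map (fun n => k + n) := by
  induction names with
  | nil => intro k s; simp [pairsFrom, PySem.Dict.get?, List.idxOf?]
  | cons n ns ih =>
    intro k s
    rw [pairsFrom, PySem.Dict.get?_mk_cons, List.idxOf?, List.findIdx?_cons]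
    by_cases h : n = s
    · subst h; simp
    · have hb : (n == s) = false := by simpa using h
      simp only [hb, Bool.false_eq_true, if_false, ih (k + 1) s, List.idxOf?]
      cases List.findIdx? (fun x => x == s) ns with
      | none => simp
      | some m => simp; omega

theorem rank_val (s : String) :
    RANK.get? s = (List.idxOf? s HONEYPOT_NAMES).map Int.ofNat := by
  rw [RANK_eq, get?_pairsFrom]
  cases List.idxOf? s HONEYPOT_NAMES with
  | none => rfl
  | some m => simp [Int.ofNat_eq_natCast]

theorem rank_contains (s : String) : RANK.contains s = HONEYPOT_NAMES.contains s := by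
  rw [PySem.Dict.contains_eq_isSome_get?, rank_val, Option.isSome_map]
  by_cases hm : s ∈ HONEYPOT_NAMES
  · rw [List.isSome_idxOf?.2 hm]
    rw [Bool.eq_iff_iff, List.contains_iff_mem]
    simpa using hm
  · rw [List.idxOf?_eq_none_iff.2 hm]
    rw [Bool.eq_iff_iff, List.contains_iff_mem]
    simpa using hm

-- min of an optional accumulator and a Nat
def myMinN (acc : Option Nat) (r : Nat) : Option Nat :=
  match acc with
  | none => some r
  | some b => if r < b then some r else some b

-- the fold B runs, pushed through the filterMap of ranks
theorem fold_to_filterMap (L : List String) : ∀ (acc : Option Int),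
    L.foldl (fun best seg =>
        match RANK.get? seg with
        | some r => if best.all (fun b => r < b) then some r else best
        | none => best) acc
      = (L.filterMap (fun s => RANK.get? s)).foldl
          (fun best r => match best with
            | none => some r
            | some b => if r < b then some r else some b) acc := by
  induction L with
  | nil => intro acc; rfl
  | cons s L ih =>
    intro acc
    rw [List.foldl_cons, List.filterMap_cons]
    cases h : RANK.get? s with
    | none => simpa [h] using ih acc
    | some r =>
      rw [List.foldl_cons]
      rw [ih]
      congr 1
      cases acc with
      | none => rfl
      | some b => simp [Option.all]

-- casting ℕ-min folds to ℤ-min folds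
theorem fold_cast (rs : List Nat) : ∀ (acc : Option Nat),
    (rs.map Int.ofNat).foldl
        (fun best r => match best with
          | none => some r
          | some b => if r < b then some r else some b) (acc.map Int.ofNat)
      = (rs.foldl myMinN acc).map Int.ofNat := by
  induction rs with
  | nil => intro acc; rfl
  | cons r rs ih =>
    intro acc
    rw [List.map_cons, List.foldl_cons, List.foldl_cons]
    have hstep : (match acc.map Int.ofNat with
        | none => some (Int.ofNat r)
        | some b => if Int.ofNat r < b then some (Int.ofNat r) else some b)
        = (myMinN acc r).map Int.ofNat := by
      cases acc with
      | none => rfl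
      | some b =>
        simp only [Option.map_some, myMinN, Int.ofNat_eq_natCast]
        by_cases h : r < b
        · rw [if_pos (by exact_mod_cast h), if_pos h]; rfl
        · rw [if_neg (by exact_mod_cast h), if_neg h]; rfl

    rw [hstep, ih]

theorem foldl_myMinN_some_zero (rs : List Nat) : rs.foldl myMinN (some 0) = some 0 := by
  induction rs with
  | nil => rfl
  | cons r rs ih =>
    rw [List.foldl_cons]
    have : myMinN (some 0) r = some 0 := by
      simp [myMinN]
    rw [this, ih]

theorem foldl_myMinN_zero_mem (rs : List Nat) (h : 0 ∈ rs) : ∀ acc,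
    rs.foldl myMinN acc = some 0 := by
  induction rs with
  | nil => simp at h
  | cons r rs ih =>
    intro acc
    rcases List.mem_cons.1 h with rfl | hmem
    · rw [List.foldl_cons]
      have : myMinN acc 0 = some 0 := by
        cases acc with
        | none => rfl
        | some b =>
          simp only [myMinN]
          by_cases hb : 0 < b
          · rw [if_pos hb]
          · rw [if_neg hb]
            have hb0 : b = 0 := by omega
            rw [hb0]
      rw [this, foldl_myMinN_some_zero]
    · rw [List.foldl_cons]
      exact ih hmem _

theorem foldl_myMinN_shift (rs : List Nat) : ∀ (acc : Option Nat),
    (rs.map (· + 1)).foldl myMinN (acc.map (· + 1)) = (rs.foldl myMinN acc).map (· + 1) := by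
  induction rs with
  | nil => intro acc; rfl
  | cons r rs ih =>
    intro acc
    rw [List.map_cons, List.foldl_cons, List.foldl_cons]
    have hstep : myMinN (acc.map (· + 1)) (r + 1) = (myMinN acc r).map (· + 1) := by
      cases acc with
      | none => rfl
      | some b =>
        simp only [Option.map_some, myMinN]
        by_cases h : r < b
        · rw [if_pos (by omega), if_pos h]; rfl
        · rw [if_neg (by omega), if_neg h]; rfl
    rw [hstep, ih]

theorem foldl_myMinN_mem (rs : List Nat) : ∀ (acc : Option Nat) (m : Nat),
    rs.foldl myMinN acc = some m → m ∈ rs ∨ acc = some m := by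
  induction rs with
  | nil => intro acc m h; exact Or.inr h
  | cons r rs ih =>
    intro acc m h
    rw [List.foldl_cons] at h
    rcases ih (myMinN acc r) m h with hmem | heq
    · exact Or.inl (List.mem_cons_of_mem _ hmem)
    · cases acc with
      | none =>
        simp only [myMinN] at heq
        exact Or.inl (by simp [← Option.some_inj.1 heq])
      | some b =>
        simp only [myMinN] at heq
        by_cases hb : r < b
        · rw [if_pos hb] at heq
          exact Or.inl (by simp [← Option.some_inj.1 heq])
        · rw [if_neg hb] at heq
          exact Or.inr heq

theorem idxOf?_lt_length (names : List String) (s : String) (m : Nat)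
    (h : List.idxOf? s names = some m) : m < names.length := by
  have h2 : PySem.List.index? names s = some m := by
    rw [PySem.List.index?_eq_idxOf?]; exact h
  obtain ⟨pre, suf, hx, hlen, -⟩ := (PySem.List.index?_eq_some_iff names s m).1 h2
  subst hx
  simp [← hlen]

-- the core: the min-rank of L's members equals A's NAMES-order first match
theorem gen (names : List String) : ∀ (L : List String),
    (match (L.filterMap (fun s => List.idxOf? s names)).foldl myMinN none with
     | some m => names[m]?
     | none => none)
      = names.find? (fun hp => L.contains hp) := by
  induction names with
  | nil =>
    intro L
    have : L.filterMap (fun s => List.idxOf? s ([] : List String)) = [] := by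
      simp [List.idxOf?]
    simp [this]
  | cons n ns ih =>
    intro L
    by_cases hL : n ∈ L
    · have h0 : (0 : Nat) ∈ L.filterMap (fun s => List.idxOf? s (n :: ns)) := by
        apply List.mem_filterMap.2
        refine ⟨n, hL, ?_⟩
        rw [List.idxOf?, List.findIdx?_cons]
        simp
      rw [foldl_myMinN_zero_mem _ h0 none]
      have hfind : (n :: ns).find? (fun hp => L.contains hp) = some n := by
        rw [List.find?_cons]
        simp [List.contains_iff_mem, hL]
      rw [hfind]
      rfl
    · have hmap : L.filterMap (fun s => List.idxOf? s (n :: ns))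
          = (L.filterMap (fun s => List.idxOf? s ns)).map (· + 1) := by
        rw [List.map_filterMap]
        apply List.filterMap_congr
        intro s hs
        have hne : (n == s) = false := by
          simp only [beq_eq_false_iff_ne, ne_eq]
          intro h; subst h; exact hL hs
        rw [List.idxOf?, List.findIdx?_cons, hne]
        simp [List.idxOf?]
      rw [hmap]
      have := foldl_myMinN_shift (L.filterMap (fun s => List.idxOf? s ns)) none
      simp only [Option.map_none] at this
      rw [this]
      have hfind : (n :: ns).find? (fun hp => L.contains hp)
          = ns.find? (fun hp => L.contains hp) := by
        rw [List.find?_cons]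
        simp [List.contains_iff_mem, hL]
      rw [hfind, ← ih L]
      cases (L.filterMap (fun s => List.idxOf? s ns)).foldl myMinN none with
      | none => rfl
      | some m => simp

-- ===== VERDICT (by name: the statement is the Claim_ definition above) =====
set_option maxHeartbeats 2000000 in
theorem extract_honeypot_name_spec : Claim_equal_extract_honeypot_name := by
  unfold Claim_equal_extract_honeypot_name Spec_extract_honeypot_name
  intro path _
  simp only [extract_honeypot_name, extract_honeypot_name_alt]
  set p := PySem.Str.lower path with hp
  set segs := (PySem.Str.split? p "/").getD [] with hsegs
  set L := PySem.List.slice segs (some 1) (some (-1)) with hL0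
  -- A's first loop = first NAMES element among interior segments
  have hfind1 : HONEYPOT_NAMES.find? (fun hp => PySem.Str.isIn ("/" ++ hp ++ "/") p)
      = HONEYPOT_NAMES.find? (fun hp => L.contains hp) := by
    apply find?_congr_mem
    intro hp hmem
    have hx : ('/' : Char) ∉ hp.toList := names_noSlash hp hmem
    have hLL : PySem.Str.isIn ("/" ++ hp ++ "/") p
        = PySem.Chars.isIn ('/' :: (hp.toList ++ ['/'])) p.toList := by
      rw [PySem.Str.isIn_eq]
      congr 1
      simp
    have hR : L.contains hp
        = ((pySplitSlash [] p.toList).drop 1).dropLast.contains hp.toList := by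
      rw [hL0, hsegs, segs_eq, slice_one_neg_one]
      rw [Bool.eq_iff_iff, List.contains_iff_mem, List.contains_iff_mem]
      rw [← List.map_drop, ← List.map_dropLast]
      exact mem_map_ofList hp _
    rw [hLL, hR, master]
    exact hx
  -- B's fold = the ℕ min-rank fold, cast to ℤ
  have hbest : L.foldl
      (fun best seg => match RANK.get? seg with
        | some r => if best.all (fun b => r < b) then some r else best
        | none => best) none
      = ((L.filterMap (fun s => List.idxOf? s HONEYPOT_NAMES)).foldl myMinN none).map Int.ofNat := by
    rw [fold_to_filterMap]
    have h1 : L.filterMap (fun s => RANK.get? s)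
        = (L.filterMap (fun s => List.idxOf? s HONEYPOT_NAMES)).map Int.ofNat := by
      rw [List.map_filterMap]
      exact List.filterMap_congr (fun s _ => rank_val s)
    rw [h1]
    have h2 := fold_cast (L.filterMap (fun s => List.idxOf? s HONEYPOT_NAMES)) none
    simpa using h2
  -- fallback loops agree pointwise
  have hfb : segs.find? (fun seg => RANK.contains seg)
      = segs.find? (fun piece => HONEYPOT_NAMES.contains piece) :=
    find?_congr_mem _ _ _ (fun s _ => rank_contains s)
  cases hfold : (L.filterMap (fun s => List.idxOf? s HONEYPOT_NAMES)).foldl myMinN none with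
  | none =>
    have hgen := gen HONEYPOT_NAMES L
    rw [hfold] at hgen
    have hfindN : HONEYPOT_NAMES.find? (fun hp => L.contains hp) = none := by
      simpa using hgen.symm
    rw [hfind1, hfindN, hbest, hfold, hfb]
    cases segs.find? (fun piece => HONEYPOT_NAMES.contains piece) with
    | none => rfl
    | some piece => rfl
  | some m =>
    have hmem : m ∈ L.filterMap (fun s => List.idxOf? s HONEYPOT_NAMES) := by
      rcases foldl_myMinN_mem _ none m hfold with h | h
      · exact h
      · cases h
    obtain ⟨s, hsmem, hidx⟩ := List.mem_filterMap.1 hmem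
    have hlt : m < HONEYPOT_NAMES.length := idxOf?_lt_length _ _ _ hidx
    have hget : HONEYPOT_NAMES[m]? = some HONEYPOT_NAMES[m] := List.getElem?_eq_getElem hlt
    have hgen := gen HONEYPOT_NAMES L
    rw [hfold] at hgen
    have hfindS : HONEYPOT_NAMES.find? (fun hp => L.contains hp) = some HONEYPOT_NAMES[m] := by
      rw [← hgen]
      simpa using hget
    rw [hfind1, hfindS, hbest, hfold]
    simp only [Option.map_some]
    rw [show (Int.ofNat m) = ((m : Nat) : Int) from rfl, PySem.List.pyGet?_natCast, hget]
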